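-- pv_equiv track=rewrite | github.com/reddevilwrites/hopnshoppe | search-service/main.py | _has_category_conflict
-- ===== SOURCE A (Python) =====
-- _CATEGORY_GROUPS: tuple = (
--     frozenset({"shoes", "sneakers", "boots", "sandals", "loafers", "heels", "flats", "slippers", "mules"}),
--     frozenset({"shorts", "pants", "trousers", "jeans", "leggings", "joggers", "chinos", "slacks"}),
--     frozenset({"shirt", "shirts", "tshirt", "tee", "blouse", "polo", "hoodie", "sweatshirt", "tank"}),
--     frozenset({"jacket", "coat", "parka", "blazer", "windbreaker", "vest", "cardigan"}),
--     frozenset({"dress", "dresses", "skirt", "skirts", "gown", "romper", "jumpsuit"}),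
--     frozenset({"laptop", "laptops", "notebook", "macbook", "chromebook"}),
--     frozenset({"phone", "phones", "smartphone", "iphone", "android", "mobile"}),
--     frozenset({"headphones", "earbuds", "earphones", "airpods", "headset"}),
--     frozenset({"watch", "watches", "smartwatch", "fitbit"}),
--     frozenset({"bag", "bags", "backpack", "handbag", "purse", "tote", "satchel", "duffel"}),
-- )
--
-- def _has_category_conflict(tokens_a: list, tokens_b: list) -> bool:
--     set_a, set_b = set(tokens_a), set(tokens_b)
--     for group in _CATEGORY_GROUPS:
--         a_in = bool(set_a & group)
--         b_in = bool(set_b & group)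
--         if a_in != b_in:
--             # one query is in this category group, the other is not —
--             # check if the other falls in a different group
--             other_set = set_b if a_in else set_a
--             for other_group in _CATEGORY_GROUPS:
--                 if other_group is not group and bool(other_set & other_group):
--                     return True
--     return False
-- ===== SOURCE B (Python) =====
-- _CATEGORY_GROUPS: tuple = (
--     frozenset({"shoes", "sneakers", "boots", "sandals", "loafers", "heels", "flats", "slippers", "mules"}),
--     frozenset({"shorts", "pants", "trousers", "jeans", "leggings", "joggers", "chinos", "slacks"}),
--     frozenset({"shirt", "shirts", "tshirt", "tee", "blouse", "polo", "hoodie", "sweatshirt", "tank"}),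
--     frozenset({"jacket", "coat", "parka", "blazer", "windbreaker", "vest", "cardigan"}),
--     frozenset({"dress", "dresses", "skirt", "skirts", "gown", "romper", "jumpsuit"}),
--     frozenset({"laptop", "laptops", "notebook", "macbook", "chromebook"}),
--     frozenset({"phone", "phones", "smartphone", "iphone", "android", "mobile"}),
--     frozenset({"headphones", "earbuds", "earphones", "airpods", "headset"}),
--     frozenset({"watch", "watches", "smartwatch", "fitbit"}),
--     frozenset({"bag", "bags", "backpack", "handbag", "purse", "tote", "satchel", "duffel"}),
-- )
--
--
-- def _has_category_conflict(tokens_a: list, tokens_b: list) -> bool: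
--     # Single pass over the groups with three boolean accumulators:
--     # does A match any group, does B match any group, and is there a group
--     # matched by exactly one side.  A conflict is exactly the conjunction.
--     set_a, set_b = set(tokens_a), set(tokens_b)
--     a_any = b_any = differ = False
--     for group in _CATEGORY_GROUPS:
--         a_in = not set_a.isdisjoint(group)
--         b_in = not set_b.isdisjoint(group)
--         a_any = a_any or a_in
--         b_any = b_any or b_in
--         differ = differ or (a_in != b_in)
--     return a_any and b_any and differ
-- ===== Notes on version B (the rewrite author's own statement) =====
-- stated objective: simpler
-- what changed: Replaces A's nested loop (for each group with asymmetric membership, rescan all other groups for the other side) by a single pass over the groups accumulating three booleans (A matches some group, B matches some group, some group is matched by exactly one side) and returning their conjunction.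
import Mathlib
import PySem

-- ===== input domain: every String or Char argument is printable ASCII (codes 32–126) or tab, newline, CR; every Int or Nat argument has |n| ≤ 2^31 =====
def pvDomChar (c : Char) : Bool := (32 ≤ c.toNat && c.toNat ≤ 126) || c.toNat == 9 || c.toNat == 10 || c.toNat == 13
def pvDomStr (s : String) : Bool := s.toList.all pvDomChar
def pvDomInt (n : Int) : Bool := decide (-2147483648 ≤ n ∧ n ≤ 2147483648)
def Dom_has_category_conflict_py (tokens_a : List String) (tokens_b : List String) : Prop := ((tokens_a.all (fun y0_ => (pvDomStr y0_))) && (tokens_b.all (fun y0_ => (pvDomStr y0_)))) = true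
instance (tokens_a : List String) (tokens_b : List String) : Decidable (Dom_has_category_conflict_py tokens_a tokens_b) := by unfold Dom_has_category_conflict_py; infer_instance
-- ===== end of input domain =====

-- B makes a single pass over the groups with three boolean accumulators (A matches some group,
-- B matches some group, some group is matched by exactly one side) instead of A's nested rescan
-- of all other groups (objective: simpler).

-- _CATEGORY_GROUPS, one frozenset per entry (element order inside a group is irrelevant: only
-- disjointness tests are performed)
def pvGroups : List (List String) :=
  [ ["shoes", "sneakers", "boots", "sandals", "loafers", "heels", "flats", "slippers", "mules"],
    ["shorts", "pants", "trousers", "jeans", "leggings", "joggers", "chinos", "slacks"],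
    ["shirt", "shirts", "tshirt", "tee", "blouse", "polo", "hoodie", "sweatshirt", "tank"],
    ["jacket", "coat", "parka", "blazer", "windbreaker", "vest", "cardigan"],
    ["dress", "dresses", "skirt", "skirts", "gown", "romper", "jumpsuit"],
    ["laptop", "laptops", "notebook", "macbook", "chromebook"],
    ["phone", "phones", "smartphone", "iphone", "android", "mobile"],
    ["headphones", "earbuds", "earphones", "airpods", "headset"],
    ["watch", "watches", "smartwatch", "fitbit"],
    ["bag", "bags", "backpack", "handbag", "purse", "tote", "satchel", "duffel"] ]

-- ===== PORT A =====
-- 'other_group is not group' ported as index inequality (the ten groups are distinct objects);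
-- early 'return True' / final 'return False' of the two loops ported as List.any.
def has_category_conflict_py (tokens_a : List String) (tokens_b : List String) : Bool :=
  let set_a := PySem.Set.ofList tokens_a
  let set_b := PySem.Set.ofList tokens_b
  (List.range pvGroups.length).any (fun i =>
    let group := pvGroups.getD i []
    let a_in := !(PySem.Set.inter set_a group).isEmpty
    let b_in := !(PySem.Set.inter set_b group).isEmpty
    (a_in != b_in) &&
      (List.range pvGroups.length).any (fun j =>
        (j != i) && !(PySem.Set.inter (if a_in then set_b else set_a) (pvGroups.getD j [])).isEmpty))

-- ===== PORT B =====
-- the for-loop becomes a foldl over the groups carrying (a_any, b_any, differ)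
def has_category_conflict_py_alt (tokens_a : List String) (tokens_b : List String) : Bool :=
  let set_a := PySem.Set.ofList tokens_a
  let set_b := PySem.Set.ofList tokens_b
  let st := pvGroups.foldl
    (fun (acc : Bool × Bool × Bool) group =>
      let a_in := !(PySem.Set.isdisjoint set_a group)
      let b_in := !(PySem.Set.isdisjoint set_b group)
      (acc.1 || a_in, acc.2.1 || b_in, acc.2.2 || (a_in != b_in)))
    (false, false, false)
  st.1 && st.2.1 && st.2.2

-- ===== PRECONDITION & SPEC =====
def Spec_has_category_conflict_py (tokens_a : List String) (tokens_b : List String) (out : Bool) : Prop := out = has_category_conflict_py_alt tokens_a tokens_b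
instance (tokens_a : List String) (tokens_b : List String) (out : Bool) : Decidable (Spec_has_category_conflict_py tokens_a tokens_b out) := by unfold Spec_has_category_conflict_py; infer_instance

-- ===== CLAIM (what is proved, stated in full; the proofs are below) =====
def Claim_equal_has_category_conflict_py : Prop := ∀ (tokens_a : List String) (tokens_b : List String), Dom_has_category_conflict_py tokens_a tokens_b → Spec_has_category_conflict_py tokens_a tokens_b (has_category_conflict_py tokens_a tokens_b)

-- ===== LEMMAS AND PROOFS =====

-- B's fold carries three independent or-accumulators: its result is the triple of List.any's
lemma fold_three_any {α : Type} (gs : List α) (fa fb : α → Bool) (a0 b0 c0 : Bool) :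
    gs.foldl (fun (acc : Bool × Bool × Bool) g =>
        (acc.1 || fa g, acc.2.1 || fb g, acc.2.2 || (fa g != fb g))) (a0, b0, c0)
    = (a0 || gs.any fa, b0 || gs.any fb, c0 || gs.any (fun g => fa g != fb g)) := by
  induction gs generalizing a0 b0 c0 with
  | nil => simp
  | cons g gs ih => simp [List.any_cons, ih, Bool.or_assoc]

-- A's intersection test and B's disjointness test agree per group
lemma test_eq (s g : List String) :
    (!(PySem.Set.inter s g).isEmpty) = (!(PySem.Set.isdisjoint s g)) := by
  apply Bool.eq_iff_iff.mpr
  simp [PySem.Set.isdisjoint, PySem.Set.inter]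

-- any over the index range = any over the list itself
lemma any_range_getD (gs : List (List String)) (P : List String → Bool) :
    (List.range gs.length).any (fun i => P (gs.getD i [])) = gs.any P := by
  induction gs with
  | nil => rfl
  | cons g gs ih =>
    simp only [List.length_cons, List.range_succ_eq_map, List.any_cons, List.any_map,
      Function.comp_def, List.getD_cons_zero, List.getD_cons_succ, ih]

-- push the if through the disjointness test (A's 'other_set' selection)
lemma ite_disj (c : Bool) (sa sb g : List String) :
    (!(PySem.Set.isdisjoint (if c = true then sb else sa) g))
    = (if c = true then !(PySem.Set.isdisjoint sb g) else !(PySem.Set.isdisjoint sa g)) := by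
  cases c <;> simp

-- the combinational core: A's nested index scan equals B's three or-accumulators
lemma key_lemma (n : Nat) (p q : Nat → Bool) :
    ((List.range n).any (fun i =>
        (p i != q i) && (List.range n).any (fun j => (j != i) && (if p i then q j else p j))))
    = (((List.range n).any p) && ((List.range n).any q) &&
        ((List.range n).any (fun i => p i != q i))) := by
  apply Bool.eq_iff_iff.mpr
  simp only [List.any_eq_true, List.mem_range, Bool.and_eq_true, bne_iff_ne, ne_eq]
  constructor
  · rintro ⟨i, hi, hpq, j, hj, hji, hcond⟩
    by_cases hp : p i = true
    · rw [if_pos hp] at hcond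
      exact ⟨⟨⟨i, hi, hp⟩, ⟨j, hj, hcond⟩⟩, ⟨i, hi, hpq⟩⟩
    · rw [if_neg hp] at hcond
      have hp' : p i = false := by revert hp; cases p i <;> simp
      have hq : q i = true := by revert hpq; cases hqi : q i <;> simp [hp']
      exact ⟨⟨⟨j, hj, hcond⟩, ⟨i, hi, hq⟩⟩, ⟨i, hi, hpq⟩⟩
  · rintro ⟨⟨⟨ia, hia, hpa⟩, ⟨ib, hib, hqb⟩⟩, ⟨k, hk, hkne⟩⟩
    by_cases hpk : p k = true
    · have hqk : q k = false := by revert hkne; cases q k <;> simp [hpk]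
      refine ⟨k, hk, hkne, ib, hib, ?_, by rw [if_pos hpk]; exact hqb⟩
      intro h; rw [h] at hqb; rw [hqb] at hqk; exact Bool.true_eq_false.mp hqk
    · have hpk' : p k = false := by revert hpk; cases p k <;> simp
      refine ⟨k, hk, hkne, ia, hia, ?_, by rw [if_neg hpk]; exact hpa⟩
      intro h; rw [h] at hpa; exact hpk hpa

-- ===== VERDICT (by name: the statement is the Claim_ definition above) =====
theorem has_category_conflict_py_spec : Claim_equal_has_category_conflict_py := by
  intro tokens_a tokens_b _
  show has_category_conflict_py tokens_a tokens_b = has_category_conflict_py_alt tokens_a tokens_b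
  unfold has_category_conflict_py has_category_conflict_py_alt
  simp only [test_eq, ite_disj, fold_three_any, Bool.false_or]
  rw [← any_range_getD pvGroups, ← any_range_getD pvGroups,
      ← any_range_getD pvGroups (fun g => (!PySem.Set.isdisjoint (PySem.Set.ofList tokens_a) g) != (!PySem.Set.isdisjoint (PySem.Set.ofList tokens_b) g))]
  exact key_lemma pvGroups.length _ _
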